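-- pv_equiv track=rewrite | github.com/karimkhaleel/aoc2023 | 2024/18/main.py | parse_data_one
-- ===== SOURCE A (Python) =====
-- def parse_data_one(data: str, dim: int, n_bytes: int) -> list[list[bool]]:
--     dim += 1
--     grid = [[True for _ in range(dim)] for _ in range(dim)]
--     for line in data.strip().splitlines()[:n_bytes]:
--         sx, sy = line.split(",")
--         x, y = int(sx.strip()), int(sy.strip())
--         grid[y][x] = False
--     return grid
-- ===== SOURCE B (Python) =====
-- def parse_data_one(data: str, dim: int, n_bytes: int) -> list[list[bool]]:
--     blocked = set()
--     for line in data.strip().splitlines()[:n_bytes]: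
--         sx, sy = line.split(",")
--         blocked.add((int(sx.strip()), int(sy.strip())))
--     return [[(x, y) not in blocked for x in range(dim + 1)] for y in range(dim + 1)]
-- ===== Notes on version B (the rewrite author's own statement) =====
-- stated objective: alternative
-- what changed: B collects the fallen-byte coordinates into a set and generates the grid directly by membership in one comprehension, instead of building an all-True grid and scatter-writing False into it.
-- outside the precondition, e.g. on parse_data_one('0,-1', 1, 1): A returns [[True, True], [False, True]], B returns [[True, True], [True, True]]
import Mathlib
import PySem

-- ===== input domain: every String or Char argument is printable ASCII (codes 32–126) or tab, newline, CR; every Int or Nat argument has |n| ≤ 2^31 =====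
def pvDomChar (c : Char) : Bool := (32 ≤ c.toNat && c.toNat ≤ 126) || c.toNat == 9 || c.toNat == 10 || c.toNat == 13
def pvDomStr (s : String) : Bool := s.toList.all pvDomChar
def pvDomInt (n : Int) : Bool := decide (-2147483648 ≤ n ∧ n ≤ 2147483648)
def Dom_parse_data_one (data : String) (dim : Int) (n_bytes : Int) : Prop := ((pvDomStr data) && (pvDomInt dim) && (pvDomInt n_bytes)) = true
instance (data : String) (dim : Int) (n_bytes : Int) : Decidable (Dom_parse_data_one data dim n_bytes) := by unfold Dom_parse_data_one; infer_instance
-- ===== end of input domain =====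

-- B builds a set of fallen coordinates and generates the grid by membership in one
-- comprehension instead of scatter-writing False into a mutable all-True grid (alternative decomposition).

-- line parsing as Pre_/D_ describe it (`sx, sy = line.split(",":); int(strip)`);
-- none = a line on which Python raises (ValueError)
def pvParseLine (line : String) : Option (Int × Int) :=
  match PySem.Str.split? line "," with
  | some [sx, sy] =>
    match PySem.Int.ofStr? (PySem.Str.strip sx), PySem.Int.ofStr? (PySem.Str.strip sy) with
    | some x, some y => some (x, y)
    | _, _ => none
  | _ => none

-- ===== PORT A =====
def parse_data_one (data : String) (dim : Int) (n_bytes : Int) : List (List Bool) :=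
  let d := dim + 1
  let grid : List (List Bool) :=
    (PySem.List.pyRange 0 d 1).map (fun _ => (PySem.List.pyRange 0 d 1).map (fun _ => true))
  (PySem.List.slice (PySem.Str.splitlines (PySem.Str.strip data)) none (some n_bytes)).foldl
    (fun grid line =>
      match PySem.Str.split? line "," with
      | some [sx, sy] =>
        match PySem.Int.ofStr? (PySem.Str.strip sx), PySem.Int.ofStr? (PySem.Str.strip sy) with
        | some x, some y =>
          (match PySem.List.pyGet? grid y with
           | some row => PySem.List.pySetD grid y (PySem.List.pySetD row x false)
           | none => grid)
        | _, _ => grid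
      | _ => grid) grid

-- ===== PORT B =====
def parse_data_one_alt (data : String) (dim : Int) (n_bytes : Int) : List (List Bool) :=
  let blocked : PySem.Set (Int × Int) :=
    (PySem.List.slice (PySem.Str.splitlines (PySem.Str.strip data)) none (some n_bytes)).foldl
      (fun s line =>
        match PySem.Str.split? line "," with
        | some [sx, sy] =>
          match PySem.Int.ofStr? (PySem.Str.strip sx), PySem.Int.ofStr? (PySem.Str.strip sy) with
          | some x, some y => PySem.Set.add s (x, y)
          | _, _ => s
        | _ => s) PySem.Set.empty
  (PySem.List.pyRange 0 (dim + 1) 1).map (fun y =>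
    (PySem.List.pyRange 0 (dim + 1) 1).map (fun x => !(PySem.Set.contains blocked (x, y))))

-- ===== PRECONDITION & SPEC =====
-- Pre_ admits the inputs on which A returns normally AND no coordinate is negative: every one
-- of the first n_bytes lines splits into two int()-parsable pieces with coordinates in [0, dim]
-- (outside that A raises ValueError/IndexError, except for coordinates in [-(dim+1), -1], where
-- A still returns: its grid[y][x] = False wraps Python-style to the far edge of the grid, an
-- accident of negative list indexing that a membership-built grid has no reason to reproduce).
def pvLineOK (dim : Int) (line : String) : Bool :=
  match pvParseLine line with
  | some (x, y) => decide (0 ≤ x ∧ x ≤ dim ∧ 0 ≤ y ∧ y ≤ dim)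
  | none => false

def Pre_parse_data_one (data : String) (dim : Int) (n_bytes : Int) : Prop :=
  ((PySem.List.slice (PySem.Str.splitlines (PySem.Str.strip data)) none (some n_bytes)).all
    (pvLineOK dim)) = true
instance (data : String) (dim : Int) (n_bytes : Int) : Decidable (Pre_parse_data_one data dim n_bytes) := by unfold Pre_parse_data_one; infer_instance

def pvWitness_parse_data_one : String × Int × Int := ("1,0\n0,1", 1, 2)

def Spec_parse_data_one (data : String) (dim : Int) (n_bytes : Int) (out : List (List Bool)) : Prop := out = parse_data_one_alt data dim n_bytes
instance (data : String) (dim : Int) (n_bytes : Int) (out : List (List Bool)) : Decidable (Spec_parse_data_one data dim n_bytes out) := by unfold Spec_parse_data_one; infer_instance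

-- ===== CLAIM (what is proved, stated in full; the proofs are below) =====
def Claim_equal_parse_data_one : Prop := ∀ (data : String) (dim : Int) (n_bytes : Int), Dom_parse_data_one data dim n_bytes → Pre_parse_data_one data dim n_bytes → Spec_parse_data_one data dim n_bytes (parse_data_one data dim n_bytes)

-- ===== LEMMAS AND PROOFS =====

-- the membership grid at side n for blocked set s
def pvIntRange (n : Nat) : List Int := (List.range n).map (fun k : Nat => (k : Int))

def pvGrid (n : Nat) (s : PySem.Set (Int × Int)) : List (List Bool) :=
  (pvIntRange n).map (fun y => (pvIntRange n).map (fun x => !(PySem.Set.contains s (x, y))))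

lemma pv_getElem?_intRange_map {α : Type} (f : Int → α) {n i : Nat} (hi : i < n) :
    ((pvIntRange n).map f)[i]? = some (f (i : Int)) := by
  unfold pvIntRange
  rw [List.map_map, List.getElem?_map, List.getElem?_range hi]
  rfl

lemma pv_set_map_intRange {α : Type} (f : Int → α) {n i : Nat} (v : α) (hi : i < n) :
    ((pvIntRange n).map f).set i v
      = (pvIntRange n).map (fun j => if j = (i : Int) then v else f j) := by
  unfold pvIntRange
  rw [List.map_map, List.map_map]
  apply List.ext_getElem
  · simp
  · intro k h1 h2
    simp only [List.length_set, List.length_map, List.length_range] at h1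
    rw [List.getElem_set, List.getElem_map, List.getElem_map, List.getElem_range]
    simp only [Function.comp_apply]
    split_ifs <;> first | rfl | omega

lemma pv_step (n : Nat) (s : PySem.Set (Int × Int)) (x y : Int)
    (hx0 : 0 ≤ x) (hxn : x.toNat < n) (hy0 : 0 ≤ y) (hyn : y.toNat < n) :
    (match PySem.List.pyGet? (pvGrid n s) y with
      | some row => PySem.List.pySetD (pvGrid n s) y (PySem.List.pySetD row x false)
      | none => pvGrid n s) = pvGrid n (PySem.Set.add s (x, y)) := by
  have hyi : ((y.toNat : Nat) : Int) = y := Int.toNat_of_nonneg hy0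
  have hxi : ((x.toNat : Nat) : Int) = x := Int.toNat_of_nonneg hx0
  have hget : PySem.List.pyGet? (pvGrid n s) y
      = some ((pvIntRange n).map (fun i => !(PySem.Set.contains s (i, y)))) := by
    rw [← hyi, PySem.List.pyGet?_natCast]
    unfold pvGrid
    rw [pv_getElem?_intRange_map _ hyn]
  rw [hget]
  show PySem.List.pySetD (pvGrid n s) y
      (PySem.List.pySetD ((pvIntRange n).map (fun i => !(PySem.Set.contains s (i, y)))) x false)
      = pvGrid n (PySem.Set.add s (x, y))
  rw [PySem.List.pySetD_of_nonneg _ _ hx0, PySem.List.pySetD_of_nonneg _ _ hy0]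
  rw [pv_set_map_intRange _ false hxn, hxi]
  unfold pvGrid
  rw [pv_set_map_intRange _ _ hyn, hyi]
  apply List.map_congr_left
  intro j _
  by_cases hjy : j = y
  · rw [if_pos hjy]; subst hjy
    apply List.map_congr_left
    intro i _
    by_cases hix : i = x
    · subst hix; simp
    · simp [hix, Prod.ext_iff]
  · rw [if_neg hjy]
    apply List.map_congr_left
    intro i _
    simp [hjy, Prod.ext_iff]

lemma pv_fold (n : Nat) (L : List String)
    (h : ∀ l ∈ L, ∃ x y, pvParseLine l = some (x, y) ∧ 0 ≤ x ∧ x.toNat < n ∧ 0 ≤ y ∧ y.toNat < n)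
    (s : PySem.Set (Int × Int)) :
    L.foldl (fun grid line =>
      match pvParseLine line with
      | some (x, y) =>
        match PySem.List.pyGet? grid y with
        | some row => PySem.List.pySetD grid y (PySem.List.pySetD row x false)
        | none => grid
      | none => grid) (pvGrid n s)
    = pvGrid n (L.foldl (fun s line =>
        match pvParseLine line with
        | some (x, y) => PySem.Set.add s (x, y)
        | none => s) s) := by
  induction L generalizing s with
  | nil => rfl
  | cons line rest ih =>
    obtain ⟨x, y, hp, hx0, hxn, hy0, hyn⟩ := h line List.mem_cons_self
    simp only [List.foldl_cons, hp]
    rw [pv_step n s x y hx0 hxn hy0 hyn]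
    exact ih (fun l hl => h l (List.mem_cons_of_mem _ hl)) _

-- ===== VERDICT (by name: the statement is the Claim_ definition above) =====
theorem parse_data_one_spec : Claim_equal_parse_data_one := by
  intro data dim n_bytes _ hpre
  unfold Spec_parse_data_one
  unfold parse_data_one parse_data_one_alt
  dsimp only
  have hA : (fun (grid : List (List Bool)) (line : String) =>
      match PySem.Str.split? line "," with
      | some [sx, sy] =>
        match PySem.Int.ofStr? (PySem.Str.strip sx), PySem.Int.ofStr? (PySem.Str.strip sy) with
        | some x, some y =>
          (match PySem.List.pyGet? grid y with
           | some row => PySem.List.pySetD grid y (PySem.List.pySetD row x false)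
           | none => grid)
        | _, _ => grid
      | _ => grid)
      = (fun (grid : List (List Bool)) (line : String) =>
      match pvParseLine line with
      | some (x, y) =>
        (match PySem.List.pyGet? grid y with
         | some row => PySem.List.pySetD grid y (PySem.List.pySetD row x false)
         | none => grid)
      | none => grid) := by
    funext grid line
    rcases hsp : PySem.Str.split? line "," with _ | parts
    · simp only [pvParseLine, hsp]
    · rcases parts with _ | ⟨sx, _ | ⟨sy, _ | ⟨c, rest⟩⟩⟩
      · simp only [pvParseLine, hsp]
      · simp only [pvParseLine, hsp]
      · rcases hox : PySem.Int.ofStr? (PySem.Str.strip sx) with _ | x <;>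
          rcases hoy : PySem.Int.ofStr? (PySem.Str.strip sy) with _ | y <;>
          simp only [pvParseLine, hsp, hox, hoy]
      · simp only [pvParseLine, hsp]
  have hB : (fun (s : PySem.Set (Int × Int)) (line : String) =>
      match PySem.Str.split? line "," with
      | some [sx, sy] =>
        match PySem.Int.ofStr? (PySem.Str.strip sx), PySem.Int.ofStr? (PySem.Str.strip sy) with
        | some x, some y => PySem.Set.add s (x, y)
        | _, _ => s
      | _ => s)
      = (fun (s : PySem.Set (Int × Int)) (line : String) =>
      match pvParseLine line with
      | some (x, y) => PySem.Set.add s (x, y)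
      | none => s) := by
    funext s line
    rcases hsp : PySem.Str.split? line "," with _ | parts
    · simp only [pvParseLine, hsp]
    · rcases parts with _ | ⟨sx, _ | ⟨sy, _ | ⟨c, rest⟩⟩⟩
      · simp only [pvParseLine, hsp]
      · simp only [pvParseLine, hsp]
      · rcases hox : PySem.Int.ofStr? (PySem.Str.strip sx) with _ | x <;>
          rcases hoy : PySem.Int.ofStr? (PySem.Str.strip sy) with _ | y <;>
          simp only [pvParseLine, hsp, hox, hoy]
      · simp only [pvParseLine, hsp]
  rw [hA, hB]
  unfold Pre_parse_data_one at hpre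
  rw [List.all_eq_true] at hpre
  have hall : ∀ l ∈ PySem.List.slice (PySem.Str.splitlines (PySem.Str.strip data)) none
      (some n_bytes), ∃ x y, pvParseLine l = some (x, y) ∧
        0 ≤ x ∧ x.toNat < (dim + 1).toNat ∧ 0 ≤ y ∧ y.toNat < (dim + 1).toNat := by
    intro l hl
    have h1 := hpre l hl
    unfold pvLineOK at h1
    cases hp : pvParseLine l with
    | none => rw [hp] at h1; exact absurd h1 (by simp)
    | some p =>
      obtain ⟨x, y⟩ := p
      rw [hp] at h1
      simp only [decide_eq_true_eq] at h1
      exact ⟨x, y, rfl, h1.1, by omega, h1.2.2.1, by omega⟩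
  have hrange : PySem.List.pyRange 0 (dim + 1) 1 = pvIntRange (dim + 1).toNat := by
    rw [PySem.List.pyRange_one]
    unfold pvIntRange
    simp
  rw [hrange]
  have hinit : (pvIntRange (dim + 1).toNat).map
      (fun _ => (pvIntRange (dim + 1).toNat).map (fun _ => true))
      = pvGrid (dim + 1).toNat PySem.Set.empty := by
    unfold pvGrid
    apply List.map_congr_left
    intro j _
    apply List.map_congr_left
    intro i _
    rfl
  rw [hinit]
  rw [pv_fold (dim + 1).toNat _ hall PySem.Set.empty]
  rfl
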